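-- pv_equiv track=rewrite | github.com/MayankMaheshwar/Problem-solving | arrays-and-strings/problem1/problem1.py | duplicateEven
-- ===== SOURCE A (Python) =====
-- def countEven(arr):
--     count = 0
--     for i in arr:
--         if i%2==0:
--             count += 1
--     return count
--
-- def duplicateEven(arr):
--     arr_end_idx = len(arr)-1
--     even_count = countEven(arr)
--     arr.extend([None]*even_count)
--     end = len(arr)-1
--     while arr_end_idx >= 0:
--         if arr[arr_end_idx] %2 == 0:
--             arr[end],arr[end-1] = arr[arr_end_idx],arr[arr_end_idx]
--             end -= 2
--         else:
--             arr[end] = arr[arr_end_idx]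
--             end -=1
--         arr_end_idx -= 1
--     return arr
-- ===== SOURCE B (Python) =====
-- def duplicateEven(arr):
--     result = []
--     for x in arr:
--         result.append(x)
--         if x % 2 == 0:
--             result.append(x)
--     arr[:] = result
--     return arr
-- ===== Notes on version B (the rewrite author's own statement) =====
-- stated objective: simpler
-- what changed: Replaces A's count-evens pass + None padding + backwards in-place back-fill with a single forward pass that builds a fresh list and writes it back with arr[:] = result.
import Mathlib
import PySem

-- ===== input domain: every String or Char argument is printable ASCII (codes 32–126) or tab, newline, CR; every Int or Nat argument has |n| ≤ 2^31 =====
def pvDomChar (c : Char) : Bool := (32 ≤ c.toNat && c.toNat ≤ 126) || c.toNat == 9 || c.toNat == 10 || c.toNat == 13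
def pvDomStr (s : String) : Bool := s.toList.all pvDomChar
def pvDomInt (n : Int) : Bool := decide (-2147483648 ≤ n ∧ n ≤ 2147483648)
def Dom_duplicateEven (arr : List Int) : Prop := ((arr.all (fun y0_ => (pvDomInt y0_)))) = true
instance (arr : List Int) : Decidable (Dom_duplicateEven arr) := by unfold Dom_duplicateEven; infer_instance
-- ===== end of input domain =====

-- B replaces A's count-evens pass + None padding + backwards in-place back-fill with a single
-- forward pass building a fresh list (same observable mutation via arr[:] = result; the
-- equivalence proved here is about the return value).

-- ===== PORT A =====
-- count = 0; for i in arr: if i%2==0: count += 1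
def countEvenPort (arr : List Int) : Int :=
  arr.foldl (fun count i => if i % 2 == 0 then count + 1 else count) 0

-- the while loop of A; `arr[None]` placeholders are modeled as 0 — they are never read before
-- being overwritten (reads happen only at indices < the original length), so the value is inert.
-- All indices written are nonnegative on every reachable state, so Int.toNat is exact here.
def dupLoop (a : List Int) (idx endi : Int) : List Int :=
  if h : idx ≥ 0 then
    let v := a.getD idx.toNat 0
    if v % 2 == 0 then
      dupLoop ((a.set endi.toNat v).set (endi - 1).toNat v) (idx - 1) (endi - 2)
    else
      dupLoop (a.set endi.toNat v) (idx - 1) (endi - 1)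
  else a
termination_by (idx + 1).toNat
decreasing_by all_goals omega

def duplicateEven (arr : List Int) : List Int :=
  let arr_end_idx : Int := (arr.length : Int) - 1
  let even_count : Int := countEvenPort arr
  let a := arr ++ List.replicate even_count.toNat 0   -- arr.extend([None]*even_count)
  dupLoop a arr_end_idx ((a.length : Int) - 1)

-- ===== PORT B =====
def duplicateEven_alt (arr : List Int) : List Int :=
  let result := arr.foldl (fun result x =>
    let result := result ++ [x]
    if x % 2 == 0 then result ++ [x] else result) []
  result

-- ===== PRECONDITION & SPEC =====
def Spec_duplicateEven (arr : List Int) (out : List Int) : Prop := out = duplicateEven_alt arr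
instance (arr : List Int) (out : List Int) : Decidable (Spec_duplicateEven arr out) := by unfold Spec_duplicateEven; infer_instance

-- ===== CLAIM (what is proved, stated in full; the proofs are below) =====
def Claim_equal_duplicateEven : Prop := ∀ (arr : List Int), Dom_duplicateEven arr → Spec_duplicateEven arr (duplicateEven arr)

-- ===== LEMMAS AND PROOFS =====

/-- The common answer: each even element doubled. -/
def fdup (xs : List Int) : List Int := xs.flatMap (fun x => if x % 2 == 0 then [x, x] else [x])

def evens (xs : List Int) : Nat := (xs.filter (fun x => x % 2 == 0)).length

theorem alt_eq_fdup (arr : List Int) : duplicateEven_alt arr = fdup arr := by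
  unfold duplicateEven_alt fdup
  have h : arr.foldl (fun result x =>
      let result := result ++ [x]
      if x % 2 == 0 then result ++ [x] else result) [] =
      arr.foldl (fun result x => result ++ (if x % 2 == 0 then [x, x] else [x])) [] := by
    apply PySem.List.foldl_congr_mem
    intro acc x _
    by_cases hx : x % 2 == 0 <;> simp [hx]
  rw [h, PySem.List.foldl_append_eq_flatMap]
  simp

theorem countEvenPort_eq (arr : List Int) : countEvenPort arr = (evens arr : Int) := by
  unfold countEvenPort evens
  rw [PySem.List.foldl_if_add_one]
  simp [List.countP_eq_length_filter]

/-- set at the last index of the prefix = dropLast the prefix, cons the value. -/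
theorem set_last {a : Type} (P suf : List a) (v : a) (h : P ≠ []) :
    (P ++ suf).set (P.length - 1) v = P.dropLast ++ v :: suf := by
  induction P with
  | nil => contradiction
  | cons x P ih =>
    cases P with
    | nil => simp
    | cons y Q =>
      have := ih (by simp)
      simpa [List.set] using this

theorem getD_mid (ys : List Int) (x : Int) (rest : List Int) :
    (ys ++ x :: rest).getD ys.length 0 = x := by
  simp [List.getD]

theorem dropLast_app {a : Type} (l1 l2 : List a) (h : l2 ≠ []) :
    (l1 ++ l2).dropLast = l1 ++ l2.dropLast := by
  induction l1 with
  | nil => rfl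
  | cons b t ih => cases t <;> cases l2 <;> simp_all

theorem dupLoop_spec : ∀ (pre junk suffix : List Int),
    junk.length = evens pre →
    dupLoop (pre ++ junk ++ suffix) ((pre.length : Int) - 1)
      ((pre.length : Int) + junk.length - 1) = fdup pre ++ suffix := by
  intro pre
  induction pre using List.reverseRecOn with
  | nil =>
    intro junk suffix hj
    have : junk = [] := List.eq_nil_of_length_eq_zero (by simpa [evens] using hj)
    subst this
    rw [dupLoop]
    simp [fdup]
  | append_singleton ys x ih =>
    intro junk suffix hj
    have hx : evens (ys ++ [x]) = evens ys + (if x % 2 == 0 then 1 else 0) := by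
      by_cases h : x % 2 == 0 <;> simp [evens, List.filter_append, h]
    rw [dupLoop]
    have hidx : ((ys ++ [x]).length : Int) - 1 ≥ 0 := by simp
    rw [dif_pos hidx]
    have hread : ((ys ++ [x]) ++ junk ++ suffix).getD (((ys ++ [x]).length : Int) - 1).toNat 0 = x := by
      have h1 : (ys ++ [x]) ++ junk ++ suffix = ys ++ x :: (junk ++ suffix) := by simp
      have h2 : (((ys ++ [x]).length : Int) - 1).toNat = ys.length := by simp
      rw [h1, h2, getD_mid]
    rw [hread]
    have hsplit : ys ++ [x] ++ junk ++ suffix = ys ++ ([x] ++ junk) ++ suffix := by simp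
    by_cases hpar : x % 2 == 0
    · rw [if_pos hpar]
      have hjl : junk.length = evens ys + 1 := by rw [hj, hx]; simp [hpar]
      have e1 : (((ys ++ [x]).length : Int) + junk.length - 1).toNat
          = (ys ++ ([x] ++ junk)).length - 1 := by simp; omega
      rw [hsplit, e1, set_last _ _ _ (by simp),
          dropLast_app ys ([x] ++ junk) (by simp)]
      set Q := ([x] ++ junk).dropLast with hQdef
      have hQl : Q.length = junk.length := by simp [hQdef]
      have hQne : Q ≠ [] := by
        intro h; rw [h] at hQl; simp at hQl; omega
      have e2 : (((ys ++ [x]).length : Int) + junk.length - 1 - 1).toNat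
          = (ys ++ Q).length - 1 := by simp [hQl]; omega
      rw [e2, set_last _ _ _ (by simp [hQne]), dropLast_app ys Q hQne]
      have hQ2l : Q.dropLast.length = evens ys := by simp [hQl]; omega
      have harith : ((ys ++ [x]).length : Int) - 1 - 1 = (ys.length : Int) - 1 := by
        simp
      have harith2 : ((ys ++ [x]).length : Int) + junk.length - 1 - 2
          = (ys.length : Int) + Q.dropLast.length - 1 := by
        have h1 : Q.dropLast.length = junk.length - 1 := by simp [hQl]
        rw [h1]; simp; omega
      rw [harith, harith2, ih _ _ hQ2l]
      have hfd : fdup (ys ++ [x]) = fdup ys ++ (if x % 2 == 0 then [x, x] else [x]) := by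
        simp only [fdup, List.flatMap_append, List.flatMap_cons, List.flatMap_nil, List.append_nil]
      rw [hfd, hpar]
      simp
    · rw [if_neg hpar]
      have hjl : junk.length = evens ys := by rw [hj, hx]; simp [hpar]
      have e1 : (((ys ++ [x]).length : Int) + junk.length - 1).toNat
          = (ys ++ ([x] ++ junk)).length - 1 := by simp; omega
      rw [hsplit, e1, set_last _ _ _ (by simp),
          dropLast_app ys ([x] ++ junk) (by simp)]
      set Q := ([x] ++ junk).dropLast with hQdef
      have hQl : Q.length = evens ys := by simp [hQdef]; omega
      have harith : ((ys ++ [x]).length : Int) - 1 - 1 = (ys.length : Int) - 1 := by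
        simp
      have harith2 : ((ys ++ [x]).length : Int) + junk.length - 1 - 1
          = (ys.length : Int) + Q.length - 1 := by
        rw [hQl, ← hjl]; simp; omega
      rw [harith, harith2, ih _ _ hQl]
      have hfd : fdup (ys ++ [x]) = fdup ys ++ (if x % 2 == 0 then [x, x] else [x]) := by
        simp only [fdup, List.flatMap_append, List.flatMap_cons, List.flatMap_nil, List.append_nil]
      rw [hfd, if_neg hpar]
      simp

theorem a_eq_fdup (arr : List Int) : duplicateEven arr = fdup arr := by
  have hc : (countEvenPort arr).toNat = evens arr := by rw [countEvenPort_eq]; simp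
  show dupLoop (arr ++ List.replicate (countEvenPort arr).toNat 0) ((arr.length : Int) - 1)
      (((arr ++ List.replicate (countEvenPort arr).toNat 0).length : Int) - 1) = fdup arr
  rw [hc]
  have h := dupLoop_spec arr (List.replicate (evens arr) 0) [] (by simp [evens])
  simp only [List.append_nil] at h
  have hlen : (((arr ++ List.replicate (evens arr) (0 : Int)).length : Int) - 1)
      = ((arr.length : Int) + ((List.replicate (evens arr) (0 : Int)).length : Int) - 1) := by
    simp
  rw [hlen, h]

-- ===== VERDICT (by name: the statement is the Claim_ definition above) =====
theorem duplicateEven_spec : Claim_equal_duplicateEven := by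
  intro arr _
  unfold Spec_duplicateEven
  rw [a_eq_fdup, alt_eq_fdup]
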